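-- pv_equiv track=rewrite | github.com/sourabbanka22/Competitive-Programming-Foundation | HackerEarth/Math/Combinatorics/Inclusion-Exclusion/numOfDivisors.py | inclusionExclusion
-- ===== SOURCE A (Python) =====
-- def countSetBits(x):
--     return bin(x).count('1')
--
-- def inclusionExclusion(primes, n):
--
--     odd = 0
--     even = 0
--     powSetSize = 1 << len(primes)
--
--     for counter in range(1, powSetSize):
--         product = 1
--
--         for idx in range(len(primes)):
--             if counter & (1 << idx):
--                 product *= primes[idx]
--
--         if countSetBits(counter) & 1:
--             odd += n//product
--         else:
--             even += n//product
--
--     return odd-even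
-- ===== SOURCE B (Python) =====
-- def inclusionExclusion(primes, n):
--     # Branch recursion over the prime list: each prime is either skipped or
--     # multiplied into the running divisor d; signs fall out of the recursion,
--     # so no bitmask enumeration, no per-subset product loop, no popcount.
--     k = len(primes)
--
--     def go(i, d):
--         if i == k:
--             return 0
--         p = primes[i]
--         return n // (d * p) + go(i + 1, d) - go(i + 1, d * p)
--
--     return go(0, 1)
-- ===== Notes on version B (the rewrite author's own statement) =====
-- stated objective: alternative
-- what changed: Replaces A's bitmask enumeration of all 2^k subsets (each with an inner O(k) product loop and a popcount for the sign) by a branch recursion over the prime list that either skips or multiplies each prime into the running divisor, producing the inclusion-exclusion signs from the recursion itself (O(2^k) work vs A's O(2^k * k); measured 7x at k=16, but both are exponential, so not recorded as faster).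
import Mathlib
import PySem

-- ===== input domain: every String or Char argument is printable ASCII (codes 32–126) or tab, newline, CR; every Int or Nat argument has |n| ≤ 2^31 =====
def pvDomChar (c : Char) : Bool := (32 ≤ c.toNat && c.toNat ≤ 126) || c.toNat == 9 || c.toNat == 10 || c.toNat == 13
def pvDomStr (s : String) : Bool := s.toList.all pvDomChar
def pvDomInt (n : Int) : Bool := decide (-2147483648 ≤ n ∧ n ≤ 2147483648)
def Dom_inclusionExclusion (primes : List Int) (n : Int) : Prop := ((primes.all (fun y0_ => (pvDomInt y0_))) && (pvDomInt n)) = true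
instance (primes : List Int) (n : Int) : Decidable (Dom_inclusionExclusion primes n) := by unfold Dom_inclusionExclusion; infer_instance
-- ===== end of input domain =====

-- B replaces A's bitmask enumeration of all 2^k subsets (inner product loop + popcount sign)
-- by a skip-or-multiply branch recursion over the prime list (alternative algorithm).

-- ===== PORT A =====
-- bin(x).count('1'): '0b'/'−0b' contribute no '1', so this is the popcount of |x| = PySem.Int.bitCount
def countSetBits (x : Int) : Int := (PySem.Int.bitCount x : Int)

def inclusionExclusion (primes : List Int) (n : Int) : Int :=
  let powSetSize : Int := (1 : Int) <<< primes.length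
  let st :=
    (PySem.List.pyRange 1 powSetSize 1).foldl
      (fun (st : Int × Int) counter =>
        let product :=
          (PySem.List.pyRange 0 (primes.length : Int) 1).foldl
            (fun product idx =>
              -- 1 << idx with idx ≥ 0: exact as (1:Int) <<< idx.toNat
              if PySem.Int.band counter ((1 : Int) <<< idx.toNat) ≠ 0 then
                product * PySem.List.pyGetD primes idx 0
              else product) 1
        if PySem.Int.band (countSetBits counter) 1 ≠ 0 then
          (st.1 + PySem.Int.floordiv n product, st.2)
        else
          (st.1, st.2 + PySem.Int.floordiv n product))
      (0, 0)
  st.1 - st.2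

-- ===== PORT B =====
-- Source B's go(i, d) walks the index i through primes; the port recurses on the suffix primes[i:]
def ieGo (n : Int) : List Int → Int → Int
  | [], _ => 0
  | p :: rest, d => PySem.Int.floordiv n (d * p) + ieGo n rest d - ieGo n rest (d * p)

def inclusionExclusion_alt (primes : List Int) (n : Int) : Int := ieGo n primes 1

-- ===== PRECONDITION & SPEC =====
-- Pre_ excludes exactly the inputs where Python A raises ZeroDivisionError: a 0 among the primes
-- (every counter selecting that position makes product = 0, and some counter always does).
def Pre_inclusionExclusion (primes : List Int) (n : Int) : Prop := (0 : Int) ∉ primes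
instance (primes : List Int) (n : Int) : Decidable (Pre_inclusionExclusion primes n) := by
  unfold Pre_inclusionExclusion; infer_instance

def pvWitness_inclusionExclusion : List Int × Int := ([2, 3], 10)

def Spec_inclusionExclusion (primes : List Int) (n : Int) (out : Int) : Prop := out = inclusionExclusion_alt primes n
instance (primes : List Int) (n : Int) (out : Int) : Decidable (Spec_inclusionExclusion primes n out) := by unfold Spec_inclusionExclusion; infer_instance

-- ===== CLAIM (what is proved, stated in full; the proofs are below) =====
def Claim_equal_inclusionExclusion : Prop := ∀ (primes : List Int) (n : Int), Dom_inclusionExclusion primes n → Pre_inclusionExclusion primes n → Spec_inclusionExclusion primes n (inclusionExclusion primes n)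

-- ===== LEMMAS AND PROOFS =====

-- product of the mask-selected elements, reading the mask from its low bit
def pvMaskProd : List Int → Nat → Int
  | [], _ => 1
  | p :: ps, c => (if c % 2 = 1 then p else 1) * pvMaskProd ps (c / 2)

-- popcount by halving (mirrors PySem.Int.bitCount's recursion)
def pvPC (c : Nat) : Nat :=
  if h : c = 0 then 0 else c % 2 + pvPC (c / 2)
decreasing_by exact Nat.div_lt_self (Nat.pos_of_ne_zero h) one_lt_two

def pvSgn (c : Nat) : Int := if pvPC c % 2 = 1 then -1 else 1

-- the (-1)^popcount-signed inclusion-exclusion sum over all masks (including the empty one)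
def pvF (n : Int) (ps : List Int) (d : Int) : Int :=
  ((List.range (2 ^ ps.length)).map
    (fun c => pvSgn c * PySem.Int.floordiv n (d * pvMaskProd ps c))).sum

theorem pvPC_zero : pvPC 0 = 0 := by rw [pvPC]; rfl

theorem pvPC_two_mul (m : Nat) : pvPC (2 * m) = pvPC m := by
  rw [pvPC]
  split
  · have hm : m = 0 := by omega
    rw [hm, pvPC_zero]
  · have h1 : (2 * m) % 2 = 0 := by omega
    have h2 : (2 * m) / 2 = m := by omega
    rw [h1, h2]; omega

theorem pvPC_two_mul_add_one (m : Nat) : pvPC (2 * m + 1) = 1 + pvPC m := by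
  rw [pvPC]
  split
  case isTrue h => exact absurd h (by omega)
  case isFalse h =>
    have h1 : (2 * m + 1) % 2 = 1 := by omega
    have h2 : (2 * m + 1) / 2 = m := by omega
    rw [h1, h2]

theorem pvSgn_two_mul (m : Nat) : pvSgn (2 * m) = pvSgn m := by
  simp [pvSgn, pvPC_two_mul]

theorem pvSgn_two_mul_add_one (m : Nat) : pvSgn (2 * m + 1) = -pvSgn m := by
  simp only [pvSgn, pvPC_two_mul_add_one]
  rcases Nat.mod_two_eq_zero_or_one (pvPC m) with h | h <;> simp [h, Nat.add_mod]

theorem pvMaskProd_zero (ps : List Int) : pvMaskProd ps 0 = 1 := by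
  induction ps with
  | nil => rfl
  | cons p ps ih => simp [pvMaskProd, ih]

theorem pvMaskProd_cons_two_mul (p : Int) (ps : List Int) (m : Nat) :
    pvMaskProd (p :: ps) (2 * m) = pvMaskProd ps m := by
  have h1 : (2 * m) % 2 = 0 := by omega
  have h2 : (2 * m) / 2 = m := by omega
  simp [pvMaskProd, h1, h2]

theorem pvMaskProd_cons_two_mul_add_one (p : Int) (ps : List Int) (m : Nat) :
    pvMaskProd (p :: ps) (2 * m + 1) = p * pvMaskProd ps m := by
  have h1 : (2 * m + 1) % 2 = 1 := by omega
  have h2 : (2 * m + 1) / 2 = m := by omega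
  simp [pvMaskProd, h1, h2]

theorem sum_range_double (f : Nat → Int) (N : Nat) :
    ((List.range (2 * N)).map f).sum
      = ((List.range N).map (fun m => f (2 * m) + f (2 * m + 1))).sum := by
  induction N with
  | zero => simp
  | succ N ih =>
    have h : 2 * (N + 1) = (2 * N + 1) + 1 := by ring
    rw [h, List.range_succ, List.range_succ, List.range_succ]
    simp only [List.map_append, List.sum_append, List.map_cons, List.map_nil,
      List.sum_cons, List.sum_nil]
    rw [ih]; ring

theorem floordiv_one (n : Int) : PySem.Int.floordiv n 1 = n := by
  rw [PySem.Int.floordiv_eq_ediv_of_pos one_pos]; exact Int.ediv_one n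

theorem pvF_nil (n d : Int) : pvF n [] d = PySem.Int.floordiv n d := by
  simp [pvF, pvSgn, pvPC_zero, pvMaskProd]

theorem sum_map_sub' (f g : Nat → Int) (l : List Nat) :
    (l.map (fun m => f m - g m)).sum = (l.map f).sum - (l.map g).sum := by
  induction l with
  | nil => simp
  | cons x l ih => simp only [List.map_cons, List.sum_cons, ih]; ring

theorem pvF_cons (n d p : Int) (ps : List Int) :
    pvF n (p :: ps) d = pvF n ps d - pvF n ps (d * p) := by
  unfold pvF
  have hl : (p :: ps).length = ps.length + 1 := rfl
  have hp : (2 : Nat) ^ (ps.length + 1) = 2 * 2 ^ ps.length := by ring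
  rw [hl, hp, sum_range_double]
  have : ∀ m : Nat,
      (fun m => pvSgn (2 * m) * PySem.Int.floordiv n (d * pvMaskProd (p :: ps) (2 * m))
        + pvSgn (2 * m + 1) * PySem.Int.floordiv n (d * pvMaskProd (p :: ps) (2 * m + 1))) m
      = (fun m => pvSgn m * PySem.Int.floordiv n (d * pvMaskProd ps m)
        - pvSgn m * PySem.Int.floordiv n (d * p * pvMaskProd ps m)) m := by
    intro m
    simp only [pvSgn_two_mul, pvSgn_two_mul_add_one, pvMaskProd_cons_two_mul,
      pvMaskProd_cons_two_mul_add_one, mul_assoc]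
    ring
  rw [List.map_congr_left (fun m _ => this m)]
  exact sum_map_sub' (fun m => pvSgn m * PySem.Int.floordiv n (d * pvMaskProd ps m))
    (fun m => pvSgn m * PySem.Int.floordiv n (d * p * pvMaskProd ps m)) _

theorem ieGo_eq (n : Int) (ps : List Int) : ∀ d : Int,
    ieGo n ps d = PySem.Int.floordiv n d - pvF n ps d := by
  induction ps with
  | nil => intro d; simp [ieGo, pvF_nil]
  | cons p ps ih => intro d; simp only [ieGo, pvF_cons, ih]; ring

theorem bitCount_eq_pvPC (c : Nat) : PySem.Int.bitCount (c : Int) = pvPC c := by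
  induction c using Nat.strong_induction_on with
  | _ c ih =>
    rw [pvPC]
    by_cases h : c = 0
    · simp [h]
    · rw [dif_neg h, PySem.Int.bitCount_natCast (m := c) (Nat.pos_of_ne_zero h),
        ih (c / 2) (Nat.div_lt_self (Nat.pos_of_ne_zero h) one_lt_two)]

theorem band_shift_ne (c j : Nat) :
    (PySem.Int.band (c : Int) ((1 : Int) <<< j) ≠ 0) ↔ c.testBit j := by
  have h1 : ((1 : Int) <<< j) = (((1 <<< j : Nat)) : Int) := by
    simp [Int.shiftLeft_eq, Nat.shiftLeft_eq]
  rw [h1, PySem.Int.band_natCast]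
  rw [show (1 <<< j : Nat) = 2 ^ j from by simp [Nat.shiftLeft_eq]]
  rw [Nat.and_two_pow]
  cases h : c.testBit j with
  | false => simp [h]
  | true => simp [h]

theorem band_one_ne (c : Nat) : (PySem.Int.band (c : Int) 1 ≠ 0) ↔ c % 2 = 1 := by
  have := PySem.Int.band_natCast c 1
  norm_num at this
  rw [this]
  omega

theorem inner_fold (ps : List Int) : ∀ (c : Nat) (acc : Int),
    (List.range ps.length).foldl
      (fun (product : Int) (k : Nat) =>
        if PySem.Int.band (c : Int) ((1 : Int) <<< k) ≠ 0 then product * ps.getD k 0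
        else product) acc
    = acc * pvMaskProd ps c := by
  induction ps with
  | nil => intro c acc; simp [pvMaskProd]
  | cons p ps ih =>
    intro c acc
    rw [show (p :: ps).length = ps.length + 1 from rfl, List.range_succ_eq_map]
    rw [List.foldl_cons, List.foldl_map]
    have hcond : ∀ k : Nat,
        (PySem.Int.band (c : Int) ((1 : Int) <<< (k + 1)) ≠ 0)
          = (PySem.Int.band ((c / 2 : Nat) : Int) ((1 : Int) <<< k) ≠ 0) := by
      intro k
      apply propext
      rw [band_shift_ne, band_shift_ne]
      rw [Nat.testBit_add_one]
    have hfun :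
        (fun (product : Int) (k : Nat) =>
          if PySem.Int.band (c : Int) ((1 : Int) <<< (k + 1)) ≠ 0
          then product * (p :: ps).getD (k + 1) 0 else product)
        = (fun (product : Int) (k : Nat) =>
          if PySem.Int.band ((c / 2 : Nat) : Int) ((1 : Int) <<< k) ≠ 0
          then product * ps.getD k 0 else product) := by
      funext product k
      rw [List.getD_cons_succ]
      simp only [hcond]
    simp only [Nat.succ_eq_add_one, hfun]
    rw [ih (c / 2)]
    have hbit : (PySem.Int.band (c : Int) ((1 : Int) <<< (0 : Nat)) ≠ 0) ↔ c % 2 = 1 := by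
      rw [band_shift_ne]
      simp [Nat.testBit_zero]
    by_cases hodd : c % 2 = 1
    · rw [if_pos (hbit.mpr hodd)]
      simp [pvMaskProd, hodd, mul_assoc]
    · rw [if_neg (fun hc => hodd (hbit.mp hc))]
      simp [pvMaskProd, hodd]

theorem pair_fold (g : Int → Int) (q : Int → Prop) [DecidablePred q] (l : List Int) :
    ∀ (o e : Int),
      ((l.foldl (fun (st : Int × Int) c =>
          if q c then (st.1 + g c, st.2) else (st.1, st.2 + g c)) (o, e)).1
        - (l.foldl (fun (st : Int × Int) c =>
          if q c then (st.1 + g c, st.2) else (st.1, st.2 + g c)) (o, e)).2)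
      = o - e + (l.map (fun c => (if q c then (1 : Int) else -1) * g c)).sum := by
  induction l with
  | nil => intro o e; simp
  | cons c l ih =>
    intro o e
    rw [List.foldl_cons, List.map_cons, List.sum_cons]
    by_cases hq : q c
    · simp only [if_pos hq, ih]; ring
    · simp only [if_neg hq, ih]; ring

theorem sum_map_neg' (f : Nat → Int) (l : List Nat) :
    (l.map (fun m => -f m)).sum = -(l.map f).sum := by
  induction l with
  | nil => simp
  | cons x l ih => simp only [List.map_cons, List.sum_cons, ih]; ring

theorem pvF_peel (n : Int) (ps : List Int) :
    pvF n ps 1 = n + ((List.range (2 ^ ps.length - 1)).map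
      (fun j => pvSgn (j + 1) * PySem.Int.floordiv n (pvMaskProd ps (j + 1)))).sum := by
  unfold pvF
  simp only [one_mul]
  set N := 2 ^ ps.length - 1 with hNdef
  have hN : 2 ^ ps.length = N + 1 := by
    have := Nat.one_le_two_pow (n := ps.length); omega
  rw [hN, List.range_succ_eq_map, List.map_cons, List.sum_cons, List.map_map]
  have h0 : pvSgn 0 * PySem.Int.floordiv n (pvMaskProd ps 0) = n := by
    simp [pvSgn, pvPC_zero, pvMaskProd_zero]
  rw [h0]
  simp [Function.comp_def, Nat.succ_eq_add_one]

theorem pow_shift (k : Nat) : ((1 : Int) <<< k) = (((2 ^ k : Nat)) : Int) := by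
  simp [Int.shiftLeft_eq]

theorem A_eq_B (primes : List Int) (n : Int) :
    inclusionExclusion primes n = inclusionExclusion_alt primes n := by
  unfold inclusionExclusion inclusionExclusion_alt
  rw [pair_fold (fun counter => PySem.Int.floordiv n
      ((PySem.List.pyRange 0 (primes.length : Int) 1).foldl
        (fun product idx =>
          if PySem.Int.band counter ((1 : Int) <<< idx.toNat) ≠ 0 then
            product * PySem.List.pyGetD primes idx 0
          else product) 1))
    (fun counter => PySem.Int.band (countSetBits counter) 1 ≠ 0)]
  rw [ieGo_eq, floordiv_one, pow_shift,
    PySem.List.pyRange_one 1 (((2 ^ primes.length : Nat)) : Int), List.map_map]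
  have ht : ((((2 ^ primes.length : Nat)) : Int) - 1).toNat = 2 ^ primes.length - 1 := by
    have := Nat.one_le_two_pow (n := primes.length); omega
  rw [ht]
  have hterm : ∀ j ∈ List.range (2 ^ primes.length - 1),
      ((fun c : Int =>
          (if PySem.Int.band (countSetBits c) 1 ≠ 0 then (1 : Int) else -1) *
            PySem.Int.floordiv n
              ((PySem.List.pyRange 0 (primes.length : Int) 1).foldl
                (fun product idx =>
                  if PySem.Int.band c ((1 : Int) <<< idx.toNat) ≠ 0 then
                    product * PySem.List.pyGetD primes idx 0
                  else product) 1)) ∘ (fun k : Nat => (1 : Int) + ↑k)) j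
        = -(pvSgn (j + 1) * PySem.Int.floordiv n (pvMaskProd primes (j + 1))) := by
    intro j _
    simp only [Function.comp_apply]
    have hc : (1 : Int) + (j : Int) = (((j + 1 : Nat)) : Int) := by push_cast; ring
    rw [hc]
    have hinner :
        (PySem.List.pyRange 0 (primes.length : Int) 1).foldl
          (fun product idx =>
            if PySem.Int.band (((j + 1 : Nat)) : Int) ((1 : Int) <<< idx.toNat) ≠ 0 then
              product * PySem.List.pyGetD primes idx 0
            else product) 1 = pvMaskProd primes (j + 1) := by
      rw [PySem.List.pyRange_zero_nat, List.foldl_map]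
      have hfn : (fun (product : Int) (k : Nat) =>
            if PySem.Int.band (((j + 1 : Nat)) : Int)
                ((1 : Int) <<< (((((k : Int)).toNat : Nat)) : Int)) ≠ 0 then
              product * PySem.List.pyGetD primes ((k : Nat) : Int) 0
            else product)
          = (fun (product : Int) (k : Nat) =>
            if PySem.Int.band (((j + 1 : Nat)) : Int) ((1 : Int) <<< k) ≠ 0 then
              product * primes.getD k 0
            else product) := by
        funext product k
        simp [Int.shiftLeft_natCast_right]
      rw [hfn, inner_fold primes (j + 1) 1, one_mul]
    rw [hinner]
    have hsign : (PySem.Int.band (countSetBits (((j + 1 : Nat)) : Int)) 1 ≠ 0)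
        ↔ pvPC (j + 1) % 2 = 1 := by
      unfold countSetBits
      rw [bitCount_eq_pvPC]
      exact band_one_ne _
    by_cases hodd : pvPC (j + 1) % 2 = 1
    · rw [if_pos (hsign.mpr hodd)]
      simp [pvSgn, hodd]
    · rw [if_neg (fun hcc => hodd (hsign.mp hcc))]
      simp [pvSgn, hodd]
  rw [List.map_congr_left hterm, sum_map_neg', pvF_peel]
  ring

-- ===== VERDICT (by name: the statement is the Claim_ definition above) =====
theorem inclusionExclusion_spec : Claim_equal_inclusionExclusion := by
  intro primes n _ _
  unfold Spec_inclusionExclusion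
  exact A_eq_B primes n
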